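-- pv_equiv track=rewrite | github.com/jk-jung/problem-solving | codewars/6kyu/6_Simple Fun #308: Hamming Rotate.py | hamming_rotate
-- ===== SOURCE A (Python) =====
-- def hamming_rotate(a, b):
--     r = 1 << 30
--     idx = -1
--     for i in range(len(a)):
--         t = sum(x != y for x, y in zip(a, b))
--         if r > t:
--             r = t
--             idx = i
--         a = a[-1] + a[:-1]
--
--     return idx
-- ===== SOURCE B (Python) =====
-- def hamming_rotate(a, b):
--     n = len(a)
--     if n == 0:
--         return -1
--     m = min(n, len(b))
--     pos = {}
--     for k, c in enumerate(a):
--         pos.setdefault(c, []).append(k)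
--     match = [0] * n
--     for j in range(m):
--         for k in pos.get(b[j], []):
--             match[(j - k) % n] += 1
--     best = 0
--     for i in range(1, n):
--         if match[i] > match[best]:
--             best = i
--     return best
-- ===== Notes on version B (the rewrite author's own statement) =====
-- stated objective: alternative
-- what changed: Instead of physically rotating the string n times and recounting all mismatches from scratch for every shift, B builds a per-character position index of a once and scatters each matching (j,k) character pair into a per-shift match-count array, then returns the first shift with maximal match count (= minimal Hamming distance).
import Mathlib
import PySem

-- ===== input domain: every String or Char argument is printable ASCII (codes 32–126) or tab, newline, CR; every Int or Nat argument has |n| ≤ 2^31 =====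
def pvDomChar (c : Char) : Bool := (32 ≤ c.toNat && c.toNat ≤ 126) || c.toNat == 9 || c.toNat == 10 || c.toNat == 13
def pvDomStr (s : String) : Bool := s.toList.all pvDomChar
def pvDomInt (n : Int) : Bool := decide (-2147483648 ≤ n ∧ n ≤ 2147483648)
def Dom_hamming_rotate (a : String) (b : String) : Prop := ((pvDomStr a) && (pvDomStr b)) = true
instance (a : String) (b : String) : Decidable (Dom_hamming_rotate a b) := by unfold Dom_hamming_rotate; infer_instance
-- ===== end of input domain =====

-- B replaces A's "rotate the string and recount all mismatches for every shift" with a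
-- per-character position index scattered once into a per-shift match-count array; the
-- returned rotation index is proved equal on all of Pre_.

-- ===== PORT A =====
-- A-side helper: the body of A's for-loop (state = (r, idx, current a)).
-- a[-1] is ported as pyGetD _ (-1) ' ': inside the loop the string is nonempty, so the
-- index is in range and the default is never used.
def pvStepA (bl : List Char) (st : Int × Int × List Char) (i : Int) : Int × Int × List Char :=
  let t : Int := ((st.2.2.zip bl).countP (fun p => p.1 != p.2) : Nat)
  let rs := if st.1 > t then (t, i) else (st.1, st.2.1)
  (rs.1, rs.2, PySem.List.pyGetD st.2.2 (-1) ' ' :: PySem.List.slice st.2.2 none (some (-1)))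

def hamming_rotate (a : String) (b : String) : Int :=
  ((PySem.List.pyRange 0 (PySem.Str.len a) 1).foldl (pvStepA b.toList)
    ((1 : Int) <<< 30, -1, a.toList)).2.1

-- ===== PORT B =====
-- B-side helpers: the character→positions index, the inner increment, the match array.
def pvPos (al : List Char) : PySem.Dict Char (List Int) :=
  (PySem.List.enumerate al 0).foldl (fun d kc => d.modify kc.2 [] (· ++ [kc.1])) PySem.Dict.empty

def pvStepInner (n : Nat) (j : Int) (mt : List Int) (k : Int) : List Int :=
  let i := PySem.Int.mod (j - k) (n : Int)
  PySem.List.pySetD mt i (PySem.List.pyGetD mt i 0 + 1)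

def pvMatch (al bl : List Char) (m n : Nat) : List Int :=
  (PySem.List.pyRange 0 (m : Int) 1).foldl
    (fun mt j => ((pvPos al).getD (PySem.List.pyGetD bl j ' ') []).foldl (pvStepInner n j) mt)
    (List.replicate n (0 : Int))

def hamming_rotate_alt (a : String) (b : String) : Int :=
  let al := a.toList
  let n := al.length
  if n = 0 then -1 else
    let m := min n b.toList.length
    let mt := pvMatch al b.toList m n
    (PySem.List.pyRange 1 (n : Int) 1).foldl
      (fun best i =>
        if PySem.List.pyGetD mt i 0 > PySem.List.pyGetD mt best 0 then i else best) 0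

-- ===== PRECONDITION & SPEC =====
-- Pre_ excludes only inputs on which BOTH strings have length ≥ 2^30 (computationally
-- unrunnable): there A's sentinel r = 1 << 30 may fail to exceed every mismatch count and
-- A returns its leftover idx = -1, an artefact of the sentinel; every input on which either
-- string is shorter than 2^30 characters is admitted.
def Pre_hamming_rotate (a : String) (b : String) : Prop :=
  PySem.Str.len a < 2 ^ 30 ∨ PySem.Str.len b < 2 ^ 30
instance (a : String) (b : String) : Decidable (Pre_hamming_rotate a b) := by
  unfold Pre_hamming_rotate; infer_instance

def pvWitness_hamming_rotate : String × String := ("rotate", "tatero")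

def Spec_hamming_rotate (a : String) (b : String) (out : Int) : Prop := out = hamming_rotate_alt a b
instance (a : String) (b : String) (out : Int) : Decidable (Spec_hamming_rotate a b out) := by unfold Spec_hamming_rotate; infer_instance

-- ===== CLAIM (what is proved, stated in full; the proofs are below) =====
def Claim_equal_hamming_rotate : Prop := ∀ (a : String) (b : String), Dom_hamming_rotate a b → Pre_hamming_rotate a b → Spec_hamming_rotate a b (hamming_rotate a b)

-- ===== LEMMAS AND PROOFS =====

def pvRot (al : List Char) (c : Nat) : List Char :=
  al.drop (al.length - c) ++ al.take (al.length - c)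

theorem pvRot_zero (al : List Char) : pvRot al 0 = al := by
  simp [pvRot]

theorem pvRot_step (al : List Char) (c : Nat) (hc : c < al.length) :
    PySem.List.pyGetD (pvRot al c) (-1) ' ' :: PySem.List.slice (pvRot al c) none (some (-1))
      = pvRot al (c + 1) := by
  set n := al.length with hn
  set d := n - c with hd
  have hd1 : 1 ≤ d := by omega
  have hdn : d ≤ n := by omega
  have htlen : (al.take d).length = d := by simp; omega
  have htne : al.take d ≠ [] := by
    intro h; rw [h] at htlen; simp at htlen; omega
  have hne : pvRot al c ≠ [] := by
    unfold pvRot; intro h; rcases List.append_eq_nil_iff.mp h with ⟨-, h2⟩; exact htne h2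
  rw [PySem.List.slice_to_neg_one, PySem.List.pyGetD_neg_one _ _ hne]
  show (pvRot al c).getLast hne :: (al.drop d ++ al.take d).dropLast = pvRot al (c+1)
  rw [List.dropLast_append_of_ne_nil htne]
  have hdl : (al.take d).dropLast = al.take (d - 1) := by
    rw [List.dropLast_eq_take, htlen, List.take_take]
    congr 1; omega
  have hgl : (pvRot al c).getLast hne = al[d - 1]'(by omega) := by
    unfold pvRot
    rw [List.getLast_append_right htne, List.getLast_eq_getElem]
    simp only [htlen]
    exact List.getElem_take
  rw [hdl, hgl]
  have h2 : al.length - (c + 1) = d - 1 := by omega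
  unfold pvRot
  rw [h2, List.drop_eq_getElem_cons (by omega : d - 1 < al.length)]
  have h3 : d - 1 + 1 = d := by omega
  rw [h3]
  rfl

theorem pvRot_getD (al : List Char) (i j : Nat) (hi : i < al.length) (hj : j < al.length) :
    (pvRot al i).getD j ' ' = al.getD ((j + (al.length - i)) % al.length) ' ' := by
  set n := al.length with hn
  set d := n - i with hd
  have hdrop : (al.drop d).length = i := by simp; omega
  unfold pvRot
  rw [List.getD_eq_getElem?_getD, List.getD_eq_getElem?_getD]
  by_cases hcase : j < i
  · have hmod : (j + d) % n = d + j := by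
      rw [Nat.mod_eq_of_lt (by omega)]; omega
    rw [hmod, List.getElem?_append_left (by simp; omega), List.getElem?_drop]
  · have hmod : (j + d) % n = j - i := by
      rw [Nat.mod_eq_sub_mod (by omega), Nat.mod_eq_of_lt (by omega)]; omega
    rw [hmod, List.getElem?_append_right (by simp; omega), hdrop, List.getElem?_take_of_lt (by omega)]

theorem pvZipSplit (xs ys : List Char) :
    (xs.zip ys).countP (fun p => p.1 != p.2)
      + (List.range (min xs.length ys.length)).countP (fun j => xs.getD j ' ' == ys.getD j ' ')
      = min xs.length ys.length := by
  induction xs generalizing ys with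
  | nil => simp
  | cons x xs ih =>
    cases ys with
    | nil => simp
    | cons y ys =>
      have hmin : min (x :: xs).length (y :: ys).length = min xs.length ys.length + 1 := by
        simp
      rw [hmin, List.zip_cons_cons, List.countP_cons, List.range_succ_eq_map,
        List.countP_cons, List.countP_map]
      simp only [Function.comp_def, List.getD_cons_succ, List.getD_cons_zero]
      have hih := ih ys
      simp only [List.getD_eq_getElem?_getD] at hih ⊢
      by_cases hxy : x = y <;> simp [hxy] <;> omega

def pvF (al bl : List Char) (i : Nat) : Nat :=
  ((pvRot al i).zip bl).countP (fun p => p.1 != p.2)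

def pvMc (al bl : List Char) (i : Nat) : Nat :=
  (List.range (min al.length bl.length)).countP
    (fun j => al.getD ((j + (al.length - i)) % al.length) ' ' == bl.getD j ' ')

theorem pvF_add_pvMc (al bl : List Char) (i : Nat) (hi : i < al.length) :
    pvF al bl i + pvMc al bl i = min al.length bl.length := by
  have h := pvZipSplit (pvRot al i) bl
  have hlen : (pvRot al i).length = al.length := by simp [pvRot]
  rw [hlen] at h
  have hc : pvMc al bl i
      = (List.range (min al.length bl.length)).countP
          (fun j => (pvRot al i).getD j ' ' == bl.getD j ' ') := by
    unfold pvMc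
    apply List.countP_congr
    intro j hj
    have hjm : j < min al.length bl.length := List.mem_range.mp hj
    rw [pvRot_getD al i j hi (by omega)]
  unfold pvF
  rw [hc]
  exact h

theorem pvF_le (al bl : List Char) (i : Nat) (hi : i < al.length) :
    pvF al bl i ≤ min al.length bl.length := by
  have h := pvF_add_pvMc al bl i hi
  omega

theorem pvPos_getD (al : List Char) (c : Char) :
    (pvPos al).getD c []
      = ((List.range al.length).filter (fun k => al.getD k ' ' == c)).map (fun (k : Nat) => (k : Int)) := by
  unfold pvPos
  have hswap : (PySem.List.enumerate al 0).foldl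
        (fun (d : PySem.Dict Char (List Int)) kc => d.modify kc.2 [] (· ++ [kc.1])) PySem.Dict.empty
      = ((PySem.List.enumerate al 0).map Prod.swap).foldl
        (fun (d : PySem.Dict Char (List Int)) p => d.modify p.1 [] (· ++ [p.2])) PySem.Dict.empty :=
    by rw [List.foldl_map]; simp [Prod.swap]
  rw [hswap]
  rw [PySem.Dict.getD_foldl_modify_append]
  rw [PySem.Dict.getD_empty]
  rw [PySem.List.enumerate_eq_map_pyRange al ' ']
  simp [List.filter_map, List.map_map, Function.comp_def, PySem.List.len_eq,
    PySem.List.pyRange_zero_nat, PySem.List.pyGetD_natCast]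

theorem pvModIff (n k jn i : Nat) (hk : k < n) (hi : i < n) (hj : jn < n) :
    (PySem.Int.mod ((jn : Int) - (k : Int)) (n : Int) = (i : Int))
      ↔ k = (jn + (n - i)) % n := by
  have hn : (0 : Int) < (n : Int) := by omega
  have he0 : (0 : Int) ≤ PySem.Int.mod ((jn : Int) - (k : Int)) (n : Int) :=
    PySem.Int.mod_nonneg _ hn
  have he1 : PySem.Int.mod ((jn : Int) - (k : Int)) (n : Int) < n :=
    PySem.Int.mod_lt _ hn
  have hq := PySem.Int.floordiv_mul_add_mod ((jn : Int) - (k : Int)) (n : Int)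
  set q := PySem.Int.floordiv ((jn : Int) - (k : Int)) (n : Int) with hqdef
  set e := PySem.Int.mod ((jn : Int) - (k : Int)) (n : Int) with hedef
  -- bound q
  have hql : q * n < n := by omega
  have hqg : -(2 : Int) * n < q * n := by omega
  have hq1 : q < 1 := Int.lt_of_mul_lt_mul_right (by omega : q * (n:Int) < 1 * n) (by omega)
  have hq2 : -2 < q := Int.lt_of_mul_lt_mul_right (by omega : (-2:Int) * n < q * n) (by omega)
  -- characterize the Nat mod
  have hk0 : (jn + (n - i)) % n = if jn + (n - i) < n then jn + (n - i) else jn + (n - i) - n := by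
    split_ifs with h
    · exact Nat.mod_eq_of_lt h
    · rw [Nat.mod_eq_sub_mod (by omega), Nat.mod_eq_of_lt (by omega)]
  have hq3 : q = 0 ∨ q = -1 := by omega
  rcases hq3 with h | h <;> rw [h] at hq <;> rw [hk0] <;> split_ifs with hcond <;>
    constructor <;> intro hgoal <;> omega

theorem pvKsCount (al : List Char) (c : Char) (jn i : Nat)
    (hi : i < al.length) (hj : jn < al.length) :
    ((((List.range al.length).filter (fun k => al.getD k ' ' == c)).map (fun (k : Nat) => (k : Int))).countP
        (fun k => PySem.Int.mod ((jn : Int) - k) (al.length : Int) == (i : Int)))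
      = if al.getD ((jn + (al.length - i)) % al.length) ' ' == c then 1 else 0 := by
  set n := al.length with hn
  set k0 := (jn + (n - i)) % n with hk0def
  have hk0 : k0 < n := Nat.mod_lt _ (by omega)
  rw [List.countP_map, List.countP_filter]
  have hcongr : ∀ k ∈ List.range n,
      ((((fun k => PySem.Int.mod ((jn : Int) - k) (n : Int) == (i : Int)) ∘ (fun (k : Nat) => (k : Int))) k
          && (al.getD k ' ' == c)) = true)
        ↔ (((k == k0) && (al.getD k ' ' == c)) = true) := by
    intro k hk
    have hklt : k < n := List.mem_range.mp hk
    simp only [Function.comp_def, Bool.and_eq_true, beq_iff_eq]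
    rw [pvModIff n k jn i hklt hi hj]
  rw [List.countP_congr hcongr]
  by_cases hP : (al.getD k0 ' ' == c) = true
  · rw [if_pos hP]
    have h2 : ∀ k ∈ List.range n,
        (((k == k0) && (al.getD k ' ' == c)) = true) ↔ ((k == k0) = true) := by
      intro k hk
      simp only [Bool.and_eq_true, beq_iff_eq]
      constructor
      · rintro ⟨h, -⟩; simp [h]
      · intro h
        subst h
        exact ⟨rfl, by simpa using hP⟩
    rw [List.countP_congr h2]
    have h3 : (List.range n).countP (fun k => k == k0) = (List.range n).count k0 := by
      simp [List.count_eq_countP]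
    rw [h3, List.count_range, if_pos hk0]
  · rw [if_neg hP]
    apply List.countP_eq_zero.mpr
    intro k hk
    by_cases hkk : k = k0
    · subst hkk
      simp only [Bool.and_eq_true]
      rintro ⟨-, h⟩
      exact hP h
    · simp [hkk]

theorem pvInnerFold (n : Nat) (hn : 0 < n) (j : Int) (ks : List Int) :
    ∀ mt : List Int, mt.length = n →
      (ks.foldl (pvStepInner n j) mt).length = n ∧
      ∀ i : Nat, i < n →
        PySem.List.pyGetD (ks.foldl (pvStepInner n j) mt) (i : Int) 0
          = PySem.List.pyGetD mt (i : Int) 0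
            + (ks.countP (fun k => PySem.Int.mod (j - k) (n : Int) == (i : Int)) : Int) := by
  induction ks with
  | nil => intro mt hlen; exact ⟨hlen, by simp⟩
  | cons k ks ih =>
    intro mt hlen
    have hn' : (0 : Int) < (n : Int) := by omega
    have he0 : (0 : Int) ≤ PySem.Int.mod (j - k) (n : Int) := PySem.Int.mod_nonneg _ hn'
    have he1 : PySem.Int.mod (j - k) (n : Int) < n := PySem.Int.mod_lt _ hn'
    set e := PySem.Int.mod (j - k) (n : Int) with hedef
    have hecast : e = ((e.toNat : Nat) : Int) := (Int.toNat_of_nonneg he0).symm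
    have hlen' : (pvStepInner n j mt k).length = n := by
      unfold pvStepInner
      rw [← hedef, PySem.List.length_pySetD, hlen]
    obtain ⟨hl2, hg2⟩ := ih (pvStepInner n j mt k) hlen'
    refine ⟨by simpa using hl2, ?_⟩
    intro i hi
    rw [List.foldl_cons, hg2 i hi]
    have hstep : PySem.List.pyGetD (pvStepInner n j mt k) (i : Int) 0
        = if i = e.toNat then PySem.List.pyGetD mt (i : Int) 0 + 1
          else PySem.List.pyGetD mt (i : Int) 0 := by
      unfold pvStepInner
      rw [← hedef]
      rw [hecast]
      rw [PySem.List.pyGetD_pySetD_natCast mt e.toNat i _ 0 (by omega)]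
      rw [← hecast]
      split_ifs with h
      · rw [hecast, ← h]
      · rfl
    rw [hstep, List.countP_cons]
    by_cases hie : i = e.toNat
    · rw [if_pos hie]
      have hbt : (PySem.Int.mod (j - k) (n : Int) == (i : Int)) = true := by
        simp only [beq_iff_eq, ← hedef]
        omega
      rw [hbt]
      simp only [if_pos hie]
      push_cast
      ring
    · rw [if_neg hie]
      have hbf : (PySem.Int.mod (j - k) (n : Int) == (i : Int)) = false := by
        simp only [Bool.eq_false_iff, ne_eq, beq_iff_eq, ← hedef]
        omega
      rw [hbf]
      simp

theorem pvMatchAux (al bl : List Char) (hn : 0 < al.length) :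
    ∀ cm : Nat, cm ≤ min al.length bl.length →
      (pvMatch al bl cm al.length).length = al.length ∧
      ∀ i : Nat, i < al.length →
        PySem.List.pyGetD (pvMatch al bl cm al.length) (i : Int) 0
          = ((List.range cm).countP
              (fun j => al.getD ((j + (al.length - i)) % al.length) ' ' == bl.getD j ' ') : Int) := by
  set n := al.length with hndef
  intro cm
  induction cm with
  | zero =>
    intro _
    unfold pvMatch
    rw [show ((0 : Nat) : Int) = 0 from rfl, PySem.List.pyRange_one_eq_nil (le_refl 0)]
    constructor
    · simp
    · intro i hi
      rw [List.foldl_nil, PySem.List.pyGetD_natCast]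
      simp
  | succ cm ih =>
    intro hcm
    obtain ⟨ihl, ihg⟩ := ih (by omega)
    unfold pvMatch at ihl ihg ⊢
    have hcast : ((cm + 1 : Nat) : Int) = (cm : Int) + 1 := by push_cast; ring
    rw [hcast, PySem.List.pyRange_one_succ_right (by omega), List.foldl_append, List.foldl_cons,
      List.foldl_nil]
    have hks := pvPos_getD al (PySem.List.pyGetD bl (cm : Int) ' ')
    obtain ⟨hfl, hfg⟩ := pvInnerFold n hn (cm : Int)
        (((pvPos al).getD (PySem.List.pyGetD bl (cm : Int) ' ') []))
        _ ihl
    refine ⟨hfl, ?_⟩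
    intro i hi
    rw [hfg i hi, ihg i hi]
    have hcm' : cm < n := by omega
    have hcount : (((pvPos al).getD (PySem.List.pyGetD bl (cm : Int) ' ') []).countP
          (fun k => PySem.Int.mod ((cm : Int) - k) (n : Int) == (i : Int)))
        = if al.getD ((cm + (n - i)) % n) ' ' == bl.getD cm ' ' then 1 else 0 := by
      rw [hks]
      simp only [PySem.List.pyGetD_natCast]
      exact pvKsCount al (bl.getD cm ' ') cm i (by omega) (by omega)
    rw [hcount, List.range_succ, List.countP_append]
    simp only [List.countP_cons, List.countP_nil]
    push_cast
    split_ifs <;> push_cast <;> ring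

theorem pvStepA_eval (bl : List Char) (r idx i : Int) (xs : List Char) :
    pvStepA bl (r, idx, xs) i
      = (if r > ((xs.zip bl).countP (fun p => p.1 != p.2) : Nat) then
           ((((xs.zip bl).countP (fun p => p.1 != p.2) : Nat) : Int), i,
            PySem.List.pyGetD xs (-1) ' ' :: PySem.List.slice xs none (some (-1)))
         else
           (r, idx, PySem.List.pyGetD xs (-1) ' ' :: PySem.List.slice xs none (some (-1)))) := by
  unfold pvStepA
  by_cases h : r > ((xs.zip bl).countP (fun p => p.1 != p.2) : Nat)
  · simp only [if_pos h]
  · simp only [if_neg h]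

def pvFirstMin (f : Nat → Nat) (n i : Nat) : Prop :=
  i < n ∧ (∀ j < n, f i ≤ f j) ∧ (∀ j < i, f i < f j)

def pvFirstMax (g : Nat → Nat) (n i : Nat) : Prop :=
  i < n ∧ (∀ j < n, g j ≤ g i) ∧ (∀ j < i, g j < g i)

theorem pvA_loop (al bl : List Char) (fuel : Nat) :
    ∀ c i0 : Nat, al.length - c = fuel → 1 ≤ c → c ≤ al.length → i0 < c →
      (∀ j, j < c → pvF al bl i0 ≤ pvF al bl j) →
      (∀ j, j < i0 → pvF al bl i0 < pvF al bl j) →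
      ∃ iStar, pvFirstMin (pvF al bl) al.length iStar ∧
        ((PySem.List.pyRange (c : Int) (al.length : Int) 1).foldl (pvStepA bl)
          (((pvF al bl i0 : Nat) : Int), (i0 : Int), pvRot al c)).2.1 = (iStar : Int) := by
  induction fuel with
  | zero =>
    intro c i0 hfuel hc1 hcn hi0 hmin hfirst
    have hceq : c = al.length := by omega
    rw [PySem.List.pyRange_one_eq_nil (by omega)]
    exact ⟨i0, ⟨by omega, fun j hj => hmin j (by omega), hfirst⟩, rfl⟩
  | succ fuel ih =>
    intro c i0 hfuel hc1 hcn hi0 hmin hfirst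
    have hclt : c < al.length := by omega
    rw [PySem.List.pyRange_one_cons (by exact_mod_cast hclt), List.foldl_cons, pvStepA_eval]
    have ht : ((pvRot al c).zip bl).countP (fun p => p.1 != p.2) = pvF al bl c := rfl
    rw [ht, pvRot_step al c hclt]
    have hcast1 : ((c : Int) + 1) = ((c + 1 : Nat) : Int) := by push_cast; ring
    by_cases hlt : pvF al bl c < pvF al bl i0
    · rw [if_pos (by exact_mod_cast hlt)]
      rw [hcast1]
      exact ih (c + 1) c (by omega) (by omega) (by omega) (by omega)
        (fun j hj => by
          rcases Nat.lt_succ_iff_lt_or_eq.mp hj with h | h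
          · exact le_of_lt (lt_of_lt_of_le hlt (hmin j h))
          · subst h; exact le_refl _)
        (fun j hj => lt_of_lt_of_le hlt (hmin j hj))
    · rw [if_neg (by exact_mod_cast hlt)]
      rw [hcast1]
      exact ih (c + 1) i0 (by omega) (by omega) (by omega) (by omega)
        (fun j hj => by
          rcases Nat.lt_succ_iff_lt_or_eq.mp hj with h | h
          · exact hmin j h
          · subst h; omega)
        hfirst

theorem pvB_loop (mt : List Int) (n : Nat) (g : Nat → Nat)
    (hmt : ∀ i, i < n → PySem.List.pyGetD mt (i : Int) 0 = (g i : Int)) (fuel : Nat) :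
    ∀ c b0 : Nat, n - c = fuel → 1 ≤ c → c ≤ n → b0 < c →
      (∀ j, j < c → g j ≤ g b0) →
      (∀ j, j < b0 → g j < g b0) →
      ∃ bStar, pvFirstMax g n bStar ∧
        ((PySem.List.pyRange (c : Int) (n : Int) 1).foldl
          (fun best i =>
            if PySem.List.pyGetD mt i 0 > PySem.List.pyGetD mt best 0 then i else best)
          (b0 : Int)) = (bStar : Int) := by
  induction fuel with
  | zero =>
    intro c b0 hfuel hc1 hcn hb0 hmax hfirst
    rw [PySem.List.pyRange_one_eq_nil (by omega)]
    exact ⟨b0, ⟨by omega, fun j hj => hmax j (by omega), hfirst⟩, rfl⟩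
  | succ fuel ih =>
    intro c b0 hfuel hc1 hcn hb0 hmax hfirst
    have hclt : c < n := by omega
    rw [PySem.List.pyRange_one_cons (by exact_mod_cast hclt), List.foldl_cons]
    rw [hmt c hclt, hmt b0 (by omega)]
    have hcast1 : ((c : Int) + 1) = ((c + 1 : Nat) : Int) := by push_cast; ring
    by_cases hlt : g b0 < g c
    · rw [if_pos (by exact_mod_cast hlt)]
      rw [hcast1]
      exact ih (c + 1) c (by omega) (by omega) (by omega) (by omega)
        (fun j hj => by
          rcases Nat.lt_succ_iff_lt_or_eq.mp hj with h | h
          · exact le_of_lt (lt_of_le_of_lt (hmax j h) hlt)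
          · subst h; exact le_refl _)
        (fun j hj => lt_of_le_of_lt (hmax j hj) hlt)
    · rw [if_neg (by exact_mod_cast hlt)]
      rw [hcast1]
      exact ih (c + 1) b0 (by omega) (by omega) (by omega) (by omega)
        (fun j hj => by
          rcases Nat.lt_succ_iff_lt_or_eq.mp hj with h | h
          · exact hmax j h
          · subst h; omega)
        hfirst

theorem pvMinMax_agree (f g : Nat → Nat) (n m i b : Nat)
    (hfg : ∀ j, j < n → f j + g j = m)
    (hmin : pvFirstMin f n i) (hmax : pvFirstMax g n b) : i = b := by
  obtain ⟨hin, hminall, hminfirst⟩ := hmin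
  obtain ⟨hbn, hmaxall, hmaxfirst⟩ := hmax
  by_contra hne
  rcases Nat.lt_or_ge i b with h | h
  · have h1 := hmaxfirst i h
    have h2 := hminall b hbn
    have h3 := hfg i hin
    have h4 := hfg b hbn
    omega
  · have hbi : b < i := by omega
    have h1 := hminfirst b hbi
    have h2 := hmaxall i hin
    have h3 := hfg i hin
    have h4 := hfg b hbn
    omega

theorem pv_main (a b : String)
    (hpre : PySem.Str.len a < 2 ^ 30 ∨ PySem.Str.len b < 2 ^ 30) :
    hamming_rotate a b = hamming_rotate_alt a b := by
  set al := a.toList with hal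
  set bl := b.toList with hbl
  by_cases hn : al.length = 0
  · unfold hamming_rotate hamming_rotate_alt
    rw [PySem.Str.len_eq, ← hal, ← hbl, hn]
    rw [show ((0 : Nat) : Int) = 0 from rfl, PySem.List.pyRange_one_eq_nil (le_refl 0)]
    simp [hn]
  · have hn0 : 0 < al.length := Nat.pos_of_ne_zero hn
    set n := al.length with hndef
    set m := min n bl.length with hmdef
    have hm : m < 2 ^ 30 := by
      rcases hpre with h | h
      · rw [PySem.Str.len_eq, ← hal] at h
        omega
      · rw [PySem.Str.len_eq, ← hbl] at h
        omega
    -- A side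
    have hA : ∃ iStar, pvFirstMin (pvF al bl) n iStar ∧ hamming_rotate a b = (iStar : Int) := by
      unfold hamming_rotate
      rw [PySem.Str.len_eq, ← hal, ← hbl]
      rw [PySem.List.pyRange_one_cons (by exact_mod_cast hn0), List.foldl_cons, pvStepA_eval]
      have ht0 : (al.zip bl).countP (fun p => p.1 != p.2) = pvF al bl 0 := by
        unfold pvF
        rw [pvRot_zero]
      have h01 := pvRot_step al 0 hn0
      rw [pvRot_zero, show (0 + 1 : Nat) = 1 from rfl] at h01
      rw [ht0, h01]
      have hle := pvF_le al bl 0 hn0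
      have hcond : (1 : Int) <<< 30 > ((pvF al bl 0 : Nat) : Int) := by
        have : ((1 : Int) <<< 30) = 1073741824 := by decide
        rw [this]
        have : pvF al bl 0 < 1073741824 := by
          have : (2 : Nat) ^ 30 = 1073741824 := by norm_num
          omega
        exact_mod_cast this
      rw [if_pos hcond]
      have hloop := pvA_loop al bl (n - 1) 1 0 (by omega) (le_refl 1) (by omega) (by omega)
        (fun j hj => by interval_cases j; exact le_refl _)
        (fun j hj => by omega)
      simp only [Nat.cast_zero, Nat.cast_one] at hloop
      rw [show ((0 : Int) + 1) = 1 from by norm_num]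
      exact hloop
    -- B side
    have hB : ∃ bStar, pvFirstMax (pvMc al bl) n bStar ∧
        hamming_rotate_alt a b = (bStar : Int) := by
      unfold hamming_rotate_alt
      rw [← hal, ← hbl]
      simp only [← hndef, ← hmdef]
      rw [if_neg hn]
      obtain ⟨hlen, hget⟩ := pvMatchAux al bl hn0 m (le_refl m)
      have := pvB_loop (pvMatch al bl m n) n (pvMc al bl)
        (fun i hi => hget i hi) (n - 1) 1 0 (by omega) (le_refl 1) (by omega) (by omega)
        (fun j hj => by interval_cases j; exact le_refl _)
        (fun j hj => by omega)
      rw [show ((1 : Nat) : Int) = 1 from by norm_num] at this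
      rw [show ((0 : Nat) : Int) = 0 from rfl] at this
      exact this
    obtain ⟨iStar, hiMin, hiEq⟩ := hA
    obtain ⟨bStar, hbMax, hbEq⟩ := hB
    have : iStar = bStar :=
      pvMinMax_agree (pvF al bl) (pvMc al bl) n m iStar bStar
        (fun j hj => pvF_add_pvMc al bl j hj) hiMin hbMax
    rw [hiEq, hbEq, this]

-- ===== VERDICT (by name: the statement is the Claim_ definition above) =====
theorem hamming_rotate_spec : Claim_equal_hamming_rotate := by
  intro a b _hdom hpre
  unfold Pre_hamming_rotate at hpre
  unfold Spec_hamming_rotate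
  exact pv_main a b hpre
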